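-- pv_equiv track=rewrite | github.com/NoeMastrorillo/aoc-2025 | 03/03.py | first_max
-- ===== SOURCE A (Python) =====
-- def first_max(l):
--     m = l[0]
--     i = 0
--     for j in range(1, len(l)):
--         if l[j] > m:
--             m = l[j]
--             i = j
--     return m, i
-- ===== SOURCE B (Python) =====
-- def first_max(l):
--     m = max(l)
--     i = l.index(m)
--     return m, i
-- ===== Notes on version B (the rewrite author's own statement) =====
-- stated objective: idiomatic
-- what changed: Replaces A's single fused index-loop tracking (max, argmax) with two builtin passes: max(l) then l.index(m).
import Mathlib
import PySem

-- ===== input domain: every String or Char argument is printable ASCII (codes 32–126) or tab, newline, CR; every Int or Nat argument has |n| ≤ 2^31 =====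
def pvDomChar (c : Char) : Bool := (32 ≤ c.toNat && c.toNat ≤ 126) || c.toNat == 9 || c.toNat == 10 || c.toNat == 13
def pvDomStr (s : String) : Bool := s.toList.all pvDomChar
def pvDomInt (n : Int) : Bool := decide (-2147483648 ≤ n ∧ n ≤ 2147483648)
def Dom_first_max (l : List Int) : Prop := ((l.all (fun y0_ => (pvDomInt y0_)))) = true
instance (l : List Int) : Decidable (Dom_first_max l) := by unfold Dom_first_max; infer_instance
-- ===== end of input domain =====

-- B replaces A's fused (max, argmax) loop with two idiomatic builtin passes: max(l) then l.index(m).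

-- ===== PORT A =====
def first_max (l : List Int) : Int × Int :=
  let m := PySem.List.pyGetD l 0 0
  let i : Int := 0
  (PySem.List.pyRange 1 (PySem.List.len l) 1).foldl
    (fun (st : Int × Int) j =>
      if PySem.List.pyGetD l j 0 > st.1 then (PySem.List.pyGetD l j 0, j) else st)
    (m, i)

-- ===== PORT B =====
def first_max_alt (l : List Int) : Int × Int :=
  let m := (PySem.List.max? l (fun x => x)).getD 0
  let i : Int := (((PySem.List.index? l m).getD 0 : Nat) : Int)
  (m, i)

-- ===== PRECONDITION & SPEC =====
-- On the empty list both programs raise (A IndexError via l[0], B ValueError via max([])).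
def Pre_first_max (l : List Int) : Prop := l ≠ []
instance (l : List Int) : Decidable (Pre_first_max l) := by unfold Pre_first_max; infer_instance
def pvWitness_first_max : List Int := ([3, 1, 3, 2])
def Spec_first_max (l : List Int) (out : Int × Int) : Prop := out = first_max_alt l
instance (l : List Int) (out : Int × Int) : Decidable (Spec_first_max l out) := by unfold Spec_first_max; infer_instance

-- ===== CLAIM (what is proved, stated in full; the proofs are below) =====
def Claim_equal_first_max : Prop := ∀ (l : List Int), Dom_first_max l → Pre_first_max l → Spec_first_max l (first_max l)

-- ===== LEMMAS AND PROOFS =====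

theorem pyGetD_app_left (l t : List Int) (j : Int) (h0 : 0 ≤ j) (h : j < (l.length : Int)) :
    PySem.List.pyGetD (l ++ t) j 0 = PySem.List.pyGetD l j 0 := by
  rw [PySem.List.pyGetD_eq_getElem _ _ h0 (by simp; omega),
      PySem.List.pyGetD_eq_getElem _ _ h0 h]
  exact List.getElem_append_left (by omega)

theorem first_max_eq_alt : ∀ (l : List Int), l ≠ [] → first_max l = first_max_alt l := by
  intro l
  induction l using List.reverseRecOn with
  | nil => intro h; exact absurd rfl h
  | append_singleton l x ih =>
    intro _
    by_cases hl : l = []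
    · subst hl
      simp [first_max, first_max_alt, PySem.List.len_eq, PySem.List.pyRange_one_eq_nil,
            PySem.List.pyGetD_of_nonneg, PySem.List.max?_id_cons]
    · have hpos : 0 < l.length := List.length_pos_iff.mpr hl
      have hlen : (1 : Int) ≤ (l.length : Int) := by exact_mod_cast hpos
      -- A side: appending x performs one more loop step
      have hA : first_max (l ++ [x]) =
          (if x > (first_max l).1 then (x, (l.length : Int)) else first_max l) := by
        unfold first_max
        have h1 : PySem.List.len (l ++ [x]) = (l.length : Int) + 1 := by
          simp [PySem.List.len_eq]
        rw [h1, PySem.List.pyRange_one_succ_right hlen, List.foldl_append]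
        have hpre : List.foldl
            (fun (st : Int × Int) j =>
              if PySem.List.pyGetD (l ++ [x]) j 0 > st.1 then (PySem.List.pyGetD (l ++ [x]) j 0, j) else st)
            (PySem.List.pyGetD (l ++ [x]) 0 0, 0) (PySem.List.pyRange 1 (l.length : Int)) =
            List.foldl
            (fun (st : Int × Int) j =>
              if PySem.List.pyGetD l j 0 > st.1 then (PySem.List.pyGetD l j 0, j) else st)
            (PySem.List.pyGetD l 0 0, 0) (PySem.List.pyRange 1 (l.length : Int)) := by
          rw [pyGetD_app_left l [x] 0 le_rfl (by exact_mod_cast hpos)]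
          refine PySem.List.foldl_congr_mem _ _ _ _ ?_
          intro acc j hj
          rw [PySem.List.mem_pyRange_one] at hj
          rw [pyGetD_app_left l [x] j (by omega) (by omega)]
        rw [hpre]
        have hx : PySem.List.pyGetD (l ++ [x]) (l.length : Int) 0 = x := by
          rw [PySem.List.pyGetD_eq_getElem _ _ (by positivity) (by simp)]
          simp
        simp only [List.foldl_cons, List.foldl_nil, hx, PySem.List.len_eq]
      -- B side facts
      obtain ⟨h, t, rfl⟩ : ∃ h t, l = h :: t := by
        cases l with
        | nil => exact absurd rfl hl
        | cons h t => exact ⟨h, t, rfl⟩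
      have hm : PySem.List.max? (h :: t) (fun y => y) = some (t.foldl max h) :=
        PySem.List.max?_id_cons h t
      have hmem : (t.foldl max h) ∈ (h :: t) := PySem.List.max?_mem hm
      have hmax : ∀ y ∈ (h :: t), y ≤ t.foldl max h := by
        intro y hy; exact PySem.List.max?_isMax hm y hy
      have hBm : PySem.List.max? ((h :: t) ++ [x]) (fun y => y) = some (max (t.foldl max h) x) := by
        rw [List.cons_append, PySem.List.max?_id_cons, List.foldl_append]
        simp
      have hAlt : first_max_alt (h :: t) =
          (t.foldl max h, (((PySem.List.index? (h :: t) (t.foldl max h)).getD 0 : Nat) : Int)) := by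
        unfold first_max_alt
        rw [hm]
        rfl
      rw [hA, ih hl, hAlt]
      by_cases hgt : x > t.foldl max h
      · have hnot : x ∉ (h :: t) := by
          intro hx
          exact absurd (hmax x hx) (not_le.mpr hgt)
        have hmx : max (t.foldl max h) x = x := max_eq_right (le_of_lt hgt)
        unfold first_max_alt
        rw [hBm, hmx]
        simp only [Option.getD_some]
        rw [PySem.List.index?_append_singleton_self _ x hnot]
        simp [hgt]
      · have hmx : max (t.foldl max h) x = t.foldl max h := max_eq_left (not_lt.mp hgt)
        unfold first_max_alt
        rw [hBm, hmx]
        simp only [Option.getD_some]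
        rw [PySem.List.index?_append_of_mem _ hmem]
        simp [hgt]

-- ===== VERDICT (by name: the statement is the Claim_ definition above) =====
theorem first_max_spec : Claim_equal_first_max := by
  intro l _ hpre
  exact first_max_eq_alt l hpre
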